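-- pv_equiv track=rewrite | github.com/hosackm/aoc2024 | src/day9.py | get_spaces
-- ===== SOURCE A (Python) =====
-- def get_spaces(layout):
--     spaces = []
--     start = layout.index(".")
--     end = start + 1
--     while end < len(layout):
--         while end < len(layout) and layout[end] == layout[start]:
--             end += 1
--
--         if layout[start] == ".":
--             spaces.append([start, end])
--         start = end
--         end = start + 1
--     return spaces
-- ===== SOURCE B (Python) =====
-- def get_spaces(layout):
--     # stage 1: collect the indices of all dots; stage 2: merge consecutive
--     # dot indices into [start, end) spans by extending the last span.
--     spans = []
--     for i in [k for k, c in enumerate(layout) if c == "."]: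
--         if spans and spans[-1][1] == i:
--             spans[-1][1] = i + 1
--         else:
--             spans.append([i, i + 1])
--     return spans
-- ===== Notes on version B (the rewrite author's own statement) =====
-- stated objective: alternative
-- what changed: B abandons A's nested while run-scan over all run boundaries: it first collects the list of dot indices (a filter over enumerate) and then merges consecutive indices into [start,end) spans by extending the last span in place.
-- intended difference: On layouts whose last element is '.' and forms a run of length exactly 1 (e.g. ['.'] or ['a','.']), A silently drops that final dot span because its outer loop exits when start reaches the last index, returning e.g. []; B returns the span [n-1, n], which is the intended behaviour for finding all free-space runs. — e.g. on get_spaces(["."]): A returns [], B returns [[0, 1]]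
-- outside the precondition, e.g. on get_spaces([]): A raises ValueError, B returns []
import Mathlib
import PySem

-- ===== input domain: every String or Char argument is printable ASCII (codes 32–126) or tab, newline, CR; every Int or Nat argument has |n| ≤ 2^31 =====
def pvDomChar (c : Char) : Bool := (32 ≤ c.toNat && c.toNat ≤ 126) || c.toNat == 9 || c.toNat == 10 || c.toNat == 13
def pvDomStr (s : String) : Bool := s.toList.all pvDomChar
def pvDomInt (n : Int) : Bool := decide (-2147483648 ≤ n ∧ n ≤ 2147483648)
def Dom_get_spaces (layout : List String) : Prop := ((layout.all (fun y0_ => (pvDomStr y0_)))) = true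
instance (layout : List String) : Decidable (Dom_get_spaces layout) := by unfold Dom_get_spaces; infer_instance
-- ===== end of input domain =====

-- B replaces A's nested while run-scan by a two-stage pass: collect the dot
-- indices, then merge consecutive indices into [start,end) spans (objective:
-- alternative). A drops a final length-1 dot run (see D_get_spaces);
-- A raises ValueError when no '.' exists (excluded by Pre_).

-- ===== PORT A =====
-- inner `while end < len(layout) and layout[end] == layout[start]: end += 1`
def innerA (layout : List String) (s : Nat) (e : Nat) : Nat :=
  if h : e < layout.length ∧ layout.getD e "" = layout.getD s "" then
    innerA layout s (e + 1)
  else e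
termination_by layout.length - e
decreasing_by omega

-- needed by outerA's termination proof
theorem innerA_ge (layout : List String) (s e : Nat) : e ≤ innerA layout s e := by
  fun_induction innerA with
  | case1 e h ih => omega
  | case2 e h => omega

-- outer `while end < len(layout): …` with state (start, end, spaces); called with e = s+1
def outerA (layout : List String) (s e : Nat) (acc : List (List Int)) : List (List Int) :=
  if h : e < layout.length then
    let e' := innerA layout s e
    outerA layout e' (e' + 1)
      (if layout.getD s "" = "." then acc ++ [[(s : Int), (e' : Int)]] else acc)
  else acc
termination_by layout.length + 1 - e
decreasing_by
  have := innerA_ge layout s e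
  omega

def get_spaces (layout : List String) : List (List Int) :=
  match PySem.List.index? layout "." with
  | some s => outerA layout s (s + 1) []
  | none => []   -- unreachable under Pre_get_spaces (Python raises ValueError here)

-- ===== PORT B =====
-- loop body: `if spans and spans[-1][1] == i: spans[-1][1] = i + 1 else: spans.append([i, i+1])`
def stepB (spans : List (List Int)) (i : Nat) : List (List Int) :=
  match spans.getLast? with
  | some sp =>
      if sp.getD 1 0 = (i : Int) then
        spans.dropLast ++ [[sp.getD 0 0, (i : Int) + 1]]
      else spans ++ [[(i : Int), (i : Int) + 1]]
  | none => [[(i : Int), (i : Int) + 1]]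

-- stage 1: `[k for k, c in enumerate(layout) if c == "."]`; stage 2: fold stepB
def get_spaces_alt (layout : List String) : List (List Int) :=
  ((List.range layout.length).filter (fun k => layout.getD k "" == ".")).foldl stepB []

-- ===== PRECONDITION & SPEC =====
-- Pre_ excludes exactly the inputs where A raises ValueError: layouts without "."
def Pre_get_spaces (layout : List String) : Prop := "." ∈ layout
instance (layout : List String) : Decidable (Pre_get_spaces layout) := by unfold Pre_get_spaces; infer_instance
def pvWitness_get_spaces : List String := [".", "x", ".", "."]

-- On layouts whose last element is "." forming a run of length exactly 1, A silently
-- drops that final span (its outer loop exits once start reaches the last index) while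
-- B returns the span [n-1, n], the intended value when collecting all free-space runs.
def D_get_spaces (layout : List String) : Prop :=
  layout ≠ [] ∧ layout.getD (layout.length - 1) "" = "." ∧
    (layout.length = 1 ∨ layout.getD (layout.length - 2) "" ≠ ".")
instance (layout : List String) : Decidable (D_get_spaces layout) := by unfold D_get_spaces; infer_instance

def Spec_get_spaces (layout : List String) (out : List (List Int)) : Prop :=
  ¬ D_get_spaces layout → out = get_spaces_alt layout
instance (layout : List String) (out : List (List Int)) : Decidable (Spec_get_spaces layout out) := by unfold Spec_get_spaces; infer_instance

def pvDiffWitness_get_spaces : List String := ["."]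
def pvDiffWitnessOut_get_spaces : (List (List Int)) × (List (List Int)) := ([], [[0, 1]])


-- ===== CLAIM (what is proved, stated in full; the proofs are below) =====
def Claim_unchanged_get_spaces : Prop := ∀ (layout : List String), Dom_get_spaces layout → Pre_get_spaces layout → Spec_get_spaces layout (get_spaces layout)
def Claim_changed_get_spaces : Prop := Dom_get_spaces (pvDiffWitness_get_spaces) ∧ Pre_get_spaces (pvDiffWitness_get_spaces) ∧ D_get_spaces (pvDiffWitness_get_spaces) ∧ get_spaces (pvDiffWitness_get_spaces) = pvDiffWitnessOut_get_spaces.1 ∧ get_spaces_alt (pvDiffWitness_get_spaces) = pvDiffWitnessOut_get_spaces.2 ∧ pvDiffWitnessOut_get_spaces.1 ≠ pvDiffWitnessOut_get_spaces.2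
def Claim_exact_get_spaces : Prop := ∀ (layout : List String), Dom_get_spaces layout → Pre_get_spaces layout → D_get_spaces layout → get_spaces layout ≠ get_spaces_alt layout

-- ===== LEMMAS AND PROOFS =====

-- A's result from a run start rs (entered with end = rs+1), accumulator factored out
def spansA (layout : List String) (rs : Nat) : List (List Int) :=
  if h : rs + 1 < layout.length then
    (if layout.getD rs "" = "." then [[(rs : Int), (innerA layout rs (rs + 1) : Int)]] else []) ++
      spansA layout (innerA layout rs (rs + 1))
  else []
termination_by layout.length - rs
decreasing_by have := innerA_ge layout rs (rs + 1); omega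

-- the maximal dot runs at positions ≥ rs
def spansB (layout : List String) (rs : Nat) : List (List Int) :=
  if h : rs < layout.length then
    (if layout.getD rs "" = "." then [[(rs : Int), (innerA layout rs (rs + 1) : Int)]] else []) ++
      spansB layout (innerA layout rs (rs + 1))
  else []
termination_by layout.length - rs
decreasing_by have := innerA_ge layout rs (rs + 1); omega

theorem innerA_le (layout : List String) (s e : Nat) (he : e ≤ layout.length) :
    innerA layout s e ≤ layout.length := by
  fun_induction innerA with
  | case1 e h ih => exact ih (by omega)
  | case2 e h => exact he

theorem innerA_mid (layout : List String) (s e : Nat) :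
    ∀ j, e ≤ j → j < innerA layout s e → layout.getD j "" = layout.getD s "" := by
  fun_induction innerA with
  | case1 e h ih =>
      intro j hj1 hj2
      rcases Nat.eq_or_lt_of_le hj1 with rfl | hj1'
      · exact h.2
      · exact ih j hj1' hj2
  | case2 e h =>
      intro j hj1 hj2
      omega

theorem innerA_stop (layout : List String) (s e : Nat)
    (hlt : innerA layout s e < layout.length) :
    layout.getD (innerA layout s e) "" ≠ layout.getD s "" := by
  fun_induction innerA with
  | case1 e h ih => exact ih hlt
  | case2 e h =>
      intro hcontra
      exact h ⟨hlt, hcontra⟩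

theorem outerA_eq_spansA (layout : List String) :
    ∀ k rs acc, layout.length - rs ≤ k →
      outerA layout rs (rs + 1) acc = acc ++ spansA layout rs := by
  intro k
  induction k with
  | zero =>
      intro rs acc hk
      rw [outerA, spansA, dif_neg (by omega : ¬ rs + 1 < layout.length),
        dif_neg (by omega : ¬ rs + 1 < layout.length)]
      simp
  | succ k ih =>
      intro rs acc hk
      rw [outerA, spansA]
      by_cases h : rs + 1 < layout.length
      · rw [dif_pos h, dif_pos h]
        have hge := innerA_ge layout rs (rs + 1)
        simp only []
        rw [ih (innerA layout rs (rs + 1)) _ (by omega)]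
        split_ifs with hdot <;> simp
      · rw [dif_neg h, dif_neg h]
        simp

-- merging a block of consecutive dot indices keeps extending the open last span
theorem fold_block (x : Int) :
    ∀ (l m : Nat) (acc : List (List Int)),
      (List.range' m l).foldl stepB (acc ++ [[x, (m : Int)]]) =
        acc ++ [[x, ((m + l : Nat) : Int)]] := by
  intro l
  induction l with
  | zero => intro m acc; simp
  | succ l ih =>
      intro m acc
      rw [List.range'_succ, List.foldl_cons]
      have hstep : stepB (acc ++ [[x, (m : Int)]]) m = acc ++ [[x, ((m + 1 : Nat) : Int)]] := by
        unfold stepB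
        rw [List.getLast?_concat]
        simp
      rw [hstep, ih (m + 1) acc, (by omega : m + 1 + l = m + (l + 1))]

theorem foldB_eq_spansB (layout : List String) :
    ∀ k rs (acc : List (List Int)), layout.length - rs ≤ k →
      (acc = [] ∨ ∃ x e0 : Int, acc.getLast? = some [x, e0] ∧
        (e0 < (rs : Int) ∨ (e0 = (rs : Int) ∧ layout.getD rs "" ≠ "."))) →
      ((List.range' rs (layout.length - rs)).filter
          (fun kk => layout.getD kk "" == ".")).foldl stepB acc
        = acc ++ spansB layout rs := by
  intro k
  induction k with
  | zero =>
      intro rs acc hk _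
      rw [(by omega : layout.length - rs = 0), spansB,
        dif_neg (by omega : ¬ rs < layout.length)]
      simp
  | succ k ih =>
      intro rs acc hk hinv
      by_cases hrs : rs < layout.length
      · have hge := innerA_ge layout rs (rs + 1)
        have hle : innerA layout rs (rs + 1) ≤ layout.length :=
          innerA_le layout rs (rs + 1) (by omega)
        set e := innerA layout rs (rs + 1) with hedef
        have hsplit : List.range' rs (layout.length - rs) =
            List.range' rs (e - rs) ++ List.range' e (layout.length - e) := by
          rw [(by omega : layout.length - rs = (e - rs) + (layout.length - e)),
            ← List.range'_append_1, (by omega : rs + (e - rs) = e)]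
        rw [hsplit, List.filter_append, List.foldl_append]
        by_cases hdot : layout.getD rs "" = "."
        · -- the whole block rs..e-1 consists of dots
          have hblockfull : (List.range' rs (e - rs)).filter
              (fun kk => layout.getD kk "" == ".") = List.range' rs (e - rs) := by
            apply List.filter_eq_self.mpr
            intro j hj
            rw [List.mem_range'_1] at hj
            rcases Nat.eq_or_lt_of_le hj.1 with rfl | hlt
            · simpa using hdot
            · have h2 := (innerA_mid layout rs (rs + 1) j (by omega) (by omega)).trans hdot
              simpa [List.getD] using h2
          rw [hblockfull,
            (by omega : e - rs = 1 + (e - (rs + 1))), ← List.range'_append_1,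
            List.foldl_append]
          have hfirst : (List.range' rs 1).foldl stepB acc = acc ++ [[(rs : Int), ((rs + 1 : Nat) : Int)]] := by
            show stepB acc rs = _
            unfold stepB
            rcases hinv with rfl | ⟨x, e0, hlast, hcond⟩
            · simp
            · rw [hlast]
              have hne : e0 ≠ (rs : Int) := by
                rcases hcond with h1 | ⟨h1, h2⟩
                · omega
                · exact absurd hdot h2
              simp only [List.getD, List.getD_eq_getElem?_getD]
              rw [if_neg (by simpa using hne)]
              push_cast; ring_nf
          rw [hfirst, fold_block (rs : Int) (e - (rs + 1)) (rs + 1) acc,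
            (by omega : rs + 1 + (e - (rs + 1)) = e)]
          by_cases helt : e < layout.length
          · rw [ih e (acc ++ [[(rs : Int), (e : Int)]]) (by omega)
              (Or.inr ⟨(rs : Int), (e : Int), by simp, Or.inr ⟨rfl, by
                have := innerA_stop layout rs (rs + 1) helt
                rw [← hedef] at this
                rw [hdot] at this
                exact this⟩⟩)]
            conv_rhs => rw [spansB, dif_pos hrs, ← hedef, if_pos hdot]
            simp
          · have h0 : layout.length - e = 0 := by omega
            rw [h0]
            simp only [List.range', List.filter_nil, List.foldl_nil]
            conv_rhs => rw [spansB, dif_pos hrs, ← hedef, if_pos hdot]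
            rw [spansB, dif_neg (by omega : ¬ e < layout.length)]
            simp
        · -- the block rs..e-1 holds no dots at all
          have hblocknone : (List.range' rs (e - rs)).filter
              (fun kk => layout.getD kk "" == ".") = [] := by
            apply List.filter_eq_nil_iff.mpr
            intro j hj
            rw [List.mem_range'_1] at hj
            rcases Nat.eq_or_lt_of_le hj.1 with rfl | hlt
            · simpa using hdot
            · have := innerA_mid layout rs (rs + 1) j (by omega) (by omega)
              rw [this]
              simpa using hdot
          rw [hblocknone, List.foldl_nil]
          rw [ih e acc (by omega) (by
            rcases hinv with rfl | ⟨x, e0, hlast, hcond⟩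
            · exact Or.inl rfl
            · exact Or.inr ⟨x, e0, hlast, Or.inl (by
                rcases hcond with h1 | ⟨h1, _⟩ <;> omega)⟩)]
          conv_rhs => rw [spansB, dif_pos hrs, ← hedef, if_neg hdot]
          simp
      · rw [(by omega : layout.length - rs = 0), spansB, dif_neg hrs]
        simp

theorem altB_eq_spansB (layout : List String) :
    get_spaces_alt layout = spansB layout 0 := by
  unfold get_spaces_alt
  have := foldB_eq_spansB layout layout.length 0 [] (by omega) (Or.inl rfl)
  rw [List.range_eq_range']
  simpa using this

theorem spansA_eq_spansB (layout : List String) (hnd : ¬ D_get_spaces layout) :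
    ∀ k rs, layout.length - rs ≤ k → rs < layout.length →
      (rs + 1 = layout.length → layout.getD rs "" ≠ ".") →
      spansA layout rs = spansB layout rs := by
  intro k
  induction k with
  | zero => intro rs h1 h2 h3; omega
  | succ k ih =>
      intro rs hk hrs hlast
      rw [spansA, spansB, dif_pos hrs]
      by_cases h : rs + 1 < layout.length
      · rw [dif_pos h]
        have hge := innerA_ge layout rs (rs + 1)
        have hle := innerA_le layout rs (rs + 1) (by omega)
        set e := innerA layout rs (rs + 1) with hedef
        congr 1
        by_cases helt : e < layout.length
        · apply ih e (by omega) helt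
          intro hlen hdot
          have hstop := innerA_stop layout rs (rs + 1) helt
          rw [← hedef] at hstop
          have hprev : layout.getD (e - 1) "" = layout.getD rs "" := by
            rcases Nat.eq_or_lt_of_le hge with heq | hlt'
            · have : e - 1 = rs := by omega
              rw [this]
            · exact innerA_mid layout rs (rs + 1) (e - 1) (by omega) (by omega)
          exact hnd ⟨List.ne_nil_of_length_pos (by omega),
            by rw [(by omega : layout.length - 1 = e)]; exact hdot,
            Or.inr (by
              rw [(by omega : layout.length - 2 = e - 1), hprev]
              intro hc
              exact hstop (by rw [hdot, hc]))⟩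
        · rw [spansA, spansB, dif_neg (by omega : ¬ e + 1 < layout.length), dif_neg helt]
      · rw [dif_neg h]
        have hlen : rs + 1 = layout.length := by omega
        rw [if_neg (hlast hlen)]
        have he : innerA layout rs (rs + 1) = rs + 1 := by
          rw [innerA, dif_neg (by simp only [not_and]; intro hc; omega)]
        rw [he, spansB, dif_neg (by omega : ¬ rs + 1 < layout.length)]
        simp

theorem spansB_skip (layout : List String) (s : Nat) (hs : s < layout.length)
    (hdot : layout.getD s "" = ".") (hpre : ∀ j, j < s → layout.getD j "" ≠ ".") :
    ∀ k rs, s - rs ≤ k → rs ≤ s → spansB layout rs = spansB layout s := by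
  intro k
  induction k with
  | zero =>
      intro rs h1 h2
      have : rs = s := by omega
      rw [this]
  | succ k ih =>
      intro rs hk hrs
      rcases Nat.eq_or_lt_of_le hrs with heq | hlt
      · rw [heq]
      · have hrslen : rs < layout.length := by omega
        rw [spansB, dif_pos hrslen]
        have hndot : layout.getD rs "" ≠ "." := hpre rs hlt
        rw [if_neg hndot]
        have hge := innerA_ge layout rs (rs + 1)
        have hes : innerA layout rs (rs + 1) ≤ s := by
          by_contra hc
          push_neg at hc
          have hmid := innerA_mid layout rs (rs + 1) s (by omega) hc
          exact hndot (by rw [← hmid]; exact hdot)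
        rw [ih (innerA layout rs (rs + 1)) (by omega) hes]
        simp


theorem mem_spansB_last (layout : List String)
    (hdot : layout.getD (layout.length - 1) "" = ".")
    (h2 : layout.length = 1 ∨ layout.getD (layout.length - 2) "" ≠ ".") :
    ∀ k rs, layout.length - rs ≤ k → rs < layout.length →
      [((layout.length - 1 : Nat) : Int), (layout.length : Int)] ∈ spansB layout rs := by
  intro k
  induction k with
  | zero => intro rs h1 h2'; omega
  | succ k ih =>
      intro rs hk hrs
      rw [spansB, dif_pos hrs]
      by_cases hend : rs = layout.length - 1
      · subst hend
        rw [if_pos hdot]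
        rw [(by omega : layout.length - 1 + 1 = layout.length)]
        have hfix : innerA layout (layout.length - 1) layout.length = layout.length := by
          rw [innerA, dif_neg (by simp only [not_and]; intro hc; omega)]
        rw [hfix]
        simp
      · have hlt : rs < layout.length - 1 := by omega
        have hge := innerA_ge layout rs (rs + 1)
        have hle := innerA_le layout rs (rs + 1) (by omega)
        have hene : innerA layout rs (rs + 1) ≠ layout.length := by
          intro hE
          have hmid1 : layout.getD (layout.length - 1) "" = layout.getD rs "" :=
            innerA_mid layout rs (rs + 1) _ (by omega) (by omega)
          have hmid2 : layout.getD (layout.length - 2) "" = layout.getD rs "" := by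
            rcases Nat.eq_or_lt_of_le (show rs ≤ layout.length - 2 by omega) with heq | hlt2
            · rw [← heq]
            · exact innerA_mid layout rs (rs + 1) _ (by omega) (by omega)
          rcases h2 with h1 | h1
          · omega
          · exact h1 (by rw [hmid2, ← hmid1, hdot])
        refine List.mem_append_right _ ?_
        exact ih (innerA layout rs (rs + 1)) (by omega) (by omega)

theorem spansA_mem_bound (layout : List String) :
    ∀ k rs, layout.length - rs ≤ k →
      ∀ x ∈ spansA layout rs, ∃ a b : Int, x = [a, b] ∧ a < (layout.length : Int) - 1 := by
  intro k
  induction k with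
  | zero =>
      intro rs hk x hx
      rw [spansA, dif_neg (by omega : ¬ rs + 1 < layout.length)] at hx
      simp at hx
  | succ k ih =>
      intro rs hk x hx
      rw [spansA] at hx
      by_cases h : rs + 1 < layout.length
      · rw [dif_pos h] at hx
        have hge := innerA_ge layout rs (rs + 1)
        rcases List.mem_append.mp hx with h1 | h1
        · split_ifs at h1 with hdot
          · simp at h1
            exact ⟨(rs : Int), (innerA layout rs (rs + 1) : Int), by rw [h1],
              by push_cast; omega⟩
          · simp at h1
        · exact ih (innerA layout rs (rs + 1)) (by omega) x h1
      · rw [dif_neg h] at hx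
        simp at hx

-- ===== VERDICT (by name: the statement is the Claim_ definition above) =====
theorem get_spaces_spec : Claim_unchanged_get_spaces := by
  intro layout _ hpre hnd
  have hsome : (PySem.List.index? layout ".").isSome :=
    (PySem.List.index?_isSome_iff layout ".").mpr hpre
  obtain ⟨s, hs⟩ := Option.isSome_iff_exists.mp hsome
  obtain ⟨hslt, hsval, hsmin⟩ := PySem.List.getElem_of_index?_eq_some hs
  have hsd : layout.getD s "" = "." := by
    rw [List.getD_eq_getElem layout "" hslt]; exact hsval
  have hminD : ∀ j, j < s → layout.getD j "" ≠ "." := by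
    intro j hj
    rw [List.getD_eq_getElem layout "" (lt_trans hj hslt)]
    exact hsmin j hj
  have hA : get_spaces layout = spansA layout s := by
    unfold get_spaces
    rw [hs]
    have := outerA_eq_spansA layout layout.length s [] (by omega)
    simpa using this
  have hAB : spansA layout s = spansB layout s := by
    apply spansA_eq_spansB layout hnd layout.length s (by omega) hslt
    intro hlen hdot
    apply hnd
    refine ⟨List.ne_nil_of_length_pos (by omega),
      by rw [(by omega : layout.length - 1 = s)]; exact hdot, ?_⟩
    by_cases h1 : layout.length = 1
    · exact Or.inl h1
    · exact Or.inr (hminD (layout.length - 2) (by omega))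
  have hskip : spansB layout 0 = spansB layout s :=
    spansB_skip layout s hslt hsd hminD s 0 (by omega) (by omega)
  rw [hA, hAB, altB_eq_spansB, hskip]

theorem get_spaces_changed : Claim_changed_get_spaces := by
  unfold Claim_changed_get_spaces
  refine ⟨by decide, by decide, by decide, ?_, by decide, by decide⟩
  show get_spaces ["."] = []
  unfold get_spaces
  rw [(by decide : PySem.List.index? ["."] "." = some 0)]
  show outerA ["."] 0 (0 + 1) [] = []
  rw [outerA_eq_spansA ["."] 1 0 [] (by decide)]
  rw [spansA, dif_neg (by decide : ¬ (0 + 1 < (["."] : List String).length))]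
  rfl

theorem get_spaces_tight : Claim_exact_get_spaces := by
  intro layout _ hpre hD heq
  obtain ⟨hne, hdot, h2⟩ := hD
  have hn : 0 < layout.length := List.length_pos_of_ne_nil hne
  have hsome : (PySem.List.index? layout ".").isSome :=
    (PySem.List.index?_isSome_iff layout ".").mpr hpre
  obtain ⟨s, hs⟩ := Option.isSome_iff_exists.mp hsome
  obtain ⟨hslt, hsval, hsmin⟩ := PySem.List.getElem_of_index?_eq_some hs
  have hA : get_spaces layout = spansA layout s := by
    unfold get_spaces
    rw [hs]
    simpa using outerA_eq_spansA layout layout.length s [] (by omega)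
  have hmem : [((layout.length - 1 : Nat) : Int), (layout.length : Int)] ∈ get_spaces_alt layout := by
    rw [altB_eq_spansB]
    exact mem_spansB_last layout hdot h2 layout.length 0 (by omega) hn
  rw [← heq, hA] at hmem
  obtain ⟨a, b, hx, hab⟩ := spansA_mem_bound layout layout.length s (by omega) _ hmem
  simp at hx
  omega
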